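-- pv_equiv track=rewrite | github.com/wararaki/aoj | vol11/p1179.py | solve
-- ===== SOURCE A (Python) =====
-- def solve(dates):
--     counter = 0;
--     start_month = dates[1]
--     start_day, end_day = dates[2], 0
--
--     for year in range(dates[0], 1000):
--         for month in range(start_month, 11):
--             if year%3 == 0 or month%2 == 1:
--                 end_day = 21
--             else:
--                 end_day = 20
--
--             # count days
--             counter += (end_day - start_day)
--
--             start_day = 1
--         else:
--             start_month = 1
--
--     return counter
-- ===== SOURCE B (Python) =====
-- def solve(dates):
--     y, m, d = dates[0], dates[1], dates[2]
--     if y >= 1000: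
--         return 0
--     if m <= 10:
--         # months m..10 of the first year; the day offset d applies to the first of them
--         n = 11 - m
--         lens = 21 * n if y % 3 == 0 else 20 * n + (11 - m) // 2
--         total = lens - n + (1 - d)
--     elif y + 1 <= 999:
--         # no month left this year: the first counted month is month 1 of the next
--         # year, and the day offset applies there
--         total = 1 - d
--     else:
--         total = 0
--     full = 999 - y                 # full years y+1 .. 999
--     t3 = 333 - y // 3              # how many of them are divisible by 3
--     return total + 200 * t3 + 195 * (full - t3)
-- ===== Notes on version B (the rewrite author's own statement) =====
-- stated objective: faster
-- what changed: Replaces A's nested year/month accumulation loops by a closed-form O(1) computation: a month-length sum formula for the partial first year (with the start-day offset applied at the first counted month, which falls in the next year when no month remains), plus a counted 200/195 split of the remaining full years via 333 - y//3.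
-- outside the precondition, e.g. on solve([5, 3]): A raises IndexError, B raises IndexError
import Mathlib
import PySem

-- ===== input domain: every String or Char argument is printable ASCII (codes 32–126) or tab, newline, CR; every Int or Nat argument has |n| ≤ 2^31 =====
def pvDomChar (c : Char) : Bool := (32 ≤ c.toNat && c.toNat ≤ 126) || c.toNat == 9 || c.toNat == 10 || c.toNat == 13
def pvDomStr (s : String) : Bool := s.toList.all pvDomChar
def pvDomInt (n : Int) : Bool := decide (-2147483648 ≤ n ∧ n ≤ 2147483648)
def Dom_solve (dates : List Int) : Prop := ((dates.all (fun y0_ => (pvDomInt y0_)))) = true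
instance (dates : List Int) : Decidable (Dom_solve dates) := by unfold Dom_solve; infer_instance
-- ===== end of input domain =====

-- B replaces A's nested year/month loops by a closed-form computation (first-year month
-- sum plus a counted split of the remaining full years); objective: faster (O(1) vs O(years*months)).

-- ===== PORT A =====
-- inner month-loop body of A
def monthStep (year : Int) (p : Int × Int) (month : Int) : Int × Int :=
  (p.1 + ((if PySem.Int.mod year 3 == 0 || PySem.Int.mod month 2 == 1 then (21 : Int) else 20) - p.2), 1)

-- outer year-loop body of A; state = (counter, start_month, start_day)
def yearStep (st : Int × Int × Int) (year : Int) : Int × Int × Int :=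
  let inner := (PySem.List.pyRange st.2.1 11 1).foldl (monthStep year) (st.1, st.2.2)
  (inner.1, 1, inner.2)

def solve (dates : List Int) : Int :=
  match dates with
  | y :: m :: d :: _ => ((PySem.List.pyRange y 1000 1).foldl yearStep (0, m, d)).1
  | _ => 0   -- guard: Python raises IndexError here; excluded by Pre_solve

-- ===== PORT B =====
def solve_alt (dates : List Int) : Int :=
  let y := PySem.List.pyGetD dates 0 0
  let m := PySem.List.pyGetD dates 1 0
  let d := PySem.List.pyGetD dates 2 0
  if 1000 ≤ y then 0
  else
    let total : Int :=
      if m ≤ 10 then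
        let n : Int := 11 - m
        let lens : Int := if PySem.Int.mod y 3 == 0 then 21 * n
                          else 20 * n + PySem.Int.floordiv (11 - m) 2
        lens - n + (1 - d)
      else if y + 1 ≤ 999 then 1 - d
      else 0
    let full : Int := 999 - y
    let t3 : Int := 333 - PySem.Int.floordiv y 3
    total + (200 * t3 + 195 * (full - t3))

-- ===== PRECONDITION & SPEC =====
-- Pre_ excludes only lists shorter than 3, on which Python A raises IndexError.
def Pre_solve (dates : List Int) : Prop := 3 ≤ dates.length
instance (dates : List Int) : Decidable (Pre_solve dates) := by unfold Pre_solve; infer_instance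
def pvWitness_solve : List Int := [998, 3, 5]

def Spec_solve (dates : List Int) (out : Int) : Prop := out = solve_alt dates
instance (dates : List Int) (out : Int) : Decidable (Spec_solve dates out) := by unfold Spec_solve; infer_instance

-- ===== CLAIM (what is proved, stated in full; the proofs are below) =====
def Claim_equal_solve : Prop := ∀ (dates : List Int), Dom_solve dates → Pre_solve dates → Spec_solve dates (solve dates)

-- ===== LEMMAS AND PROOFS =====

-- month length, proof-side form with mathematical % (divisor positive, so equal to Python's)
def monthLen (y m : Int) : Int := if y % 3 = 0 ∨ m % 2 = 1 then 21 else 20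

theorem monthStep_eq (y : Int) (p : Int × Int) (m : Int) :
    monthStep y p m = (p.1 + (monthLen y m - p.2), 1) := by
  simp only [monthStep, monthLen, PySem.Int.mod_eq_emod_of_pos (a := y) (b := 3) (by norm_num),
    PySem.Int.mod_eq_emod_of_pos (a := m) (b := 2) (by norm_num)]
  by_cases h1 : y % 3 = 0 <;> by_cases h2 : m % 2 = 1 <;> simp [h1, h2]

-- closed form of A's inner month loop, empty case
theorem inner_empty (y : Int) (m : Int) (p : Int × Int) (h : (11 : Int) ≤ m) :
    (PySem.List.pyRange m 11 1).foldl (monthStep y) p = p := by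
  rw [PySem.List.pyRange_one_eq_nil h]; rfl

-- closed form of A's inner month loop
theorem inner_closed (y : Int) : ∀ (k : Nat) (m c d : Int), 10 - m = (k : Int) →
    (PySem.List.pyRange m 11 1).foldl (monthStep y) (c, d) =
      (c + (if y % 3 = 0 then 21 * (11 - m) else 20 * (11 - m) + (11 - m) / 2)
         - (11 - m) + 1 - d, 1) := by
  intro k
  induction k with
  | zero =>
    intro m c d hm
    have hm10 : m = 10 := by omega
    subst hm10
    rw [PySem.List.pyRange_one_cons (by norm_num), PySem.List.pyRange_one_eq_nil (by norm_num)]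
    simp only [List.foldl_cons, List.foldl_nil, monthStep_eq, monthLen]
    norm_num
    ring
  | succ k ih =>
    intro m c d hm
    rw [PySem.List.pyRange_one_cons (by omega)]
    simp only [List.foldl_cons, monthStep_eq]
    rw [ih (m + 1) _ _ (by omega)]
    simp only [monthLen]
    by_cases h1 : y % 3 = 0 <;> by_cases h2 : m % 2 = 1 <;> simp [h1, h2] <;> omega

-- number of days of a full year y (months 1..10, 1 subtracted each month)
-- closed form of A's outer loop once the state has settled to start_month = 1, start_day = 1
theorem outer_closed : ∀ (k : Nat) (y c : Int), 1000 - y = (k : Int) →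
    (PySem.List.pyRange y 1000 1).foldl yearStep (c, 1, 1) =
      (c + (200 * (333 - (y - 1) / 3) + 195 * ((1000 - y) - (333 - (y - 1) / 3))), 1, 1) := by
  intro k
  induction k with
  | zero =>
    intro y c hy
    have : y = 1000 := by omega
    subst this
    rw [PySem.List.pyRange_one_eq_nil (by norm_num)]
    norm_num
  | succ k ih =>
    intro y c hy
    rw [PySem.List.pyRange_one_cons (by omega)]
    simp only [List.foldl_cons]
    have hys : yearStep (c, 1, 1) y =
        (c + (if y % 3 = 0 then 200 else 195), 1, 1) := by
      simp only [yearStep]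
      rw [inner_closed y 9 1 c 1 (by norm_num)]
      by_cases h1 : y % 3 = 0 <;> simp [h1] <;> omega
    rw [hys, ih (y + 1) _ (by omega)]
    by_cases h1 : y % 3 = 0 <;> simp only [h1, if_true, if_false] <;>
      (refine congrArg (fun z => (z, (1:Int), (1:Int))) ?_) <;> omega

-- ===== VERDICT (by name: the statement is the Claim_ definition above) =====
theorem solve_spec : Claim_equal_solve := by
  intro dates _ hpre
  match dates with
  | y :: m :: d :: rest =>
    show solve (y :: m :: d :: rest) = solve_alt (y :: m :: d :: rest)
    simp only [solve, solve_alt]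
    have g0 : PySem.List.pyGetD (y :: m :: d :: rest) 0 0 = y := by
      simp [PySem.List.pyGetD_ofNat']
    have g1 : PySem.List.pyGetD (y :: m :: d :: rest) 1 0 = m := by
      simp [PySem.List.pyGetD_ofNat']
    have g2 : PySem.List.pyGetD (y :: m :: d :: rest) 2 0 = d := by
      simp [PySem.List.pyGetD_ofNat']
    rw [g0, g1, g2]
    by_cases hy : 1000 ≤ y
    · rw [PySem.List.pyRange_one_eq_nil hy, if_pos hy]; rfl
    · rw [if_neg hy, PySem.List.pyRange_one_cons (by omega)]
      simp only [List.foldl_cons]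
      by_cases hm : m ≤ 10
      · -- first year has months m..10
        have hin : yearStep (0, m, d) y =
            ((if y % 3 = 0 then 21 * (11 - m) else 20 * (11 - m) + (11 - m) / 2)
              - (11 - m) + 1 - d, 1, 1) := by
          simp only [yearStep]
          rw [inner_closed y (10 - m).toNat m 0 d (by omega)]
          norm_num
        rw [hin, outer_closed (999 - y).toNat (y + 1) _ (by omega)]
        rw [if_pos hm]
        simp only [PySem.Int.floordiv_eq_ediv_of_pos (by norm_num : (0:Int) < 2),
          PySem.Int.floordiv_eq_ediv_of_pos (by norm_num : (0:Int) < 3),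
          PySem.Int.mod_eq_emod_of_pos (by norm_num : (0:Int) < 3)]
        have h1 : y + 1 - 1 = y := by ring
        rw [h1]
        by_cases h2 : y % 3 = 0 <;> simp [h2] <;> omega
      · -- first year empty: start_day carries into the next year
        have hin : yearStep (0, m, d) y = (0, 1, d) := by
          simp only [yearStep]
          rw [inner_empty y m (0, d) (by omega)]
        rw [hin, if_neg hm]
        by_cases hy1 : y + 1 ≤ 999
        · rw [PySem.List.pyRange_one_cons (by omega)]
          simp only [List.foldl_cons]
          have hin2 : yearStep (0, 1, d) (y + 1) =
              ((if (y + 1) % 3 = 0 then 210 else 205) - 10 + 1 - d, 1, 1) := by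
            simp only [yearStep]
            rw [inner_closed (y + 1) 9 1 0 d (by norm_num)]
            by_cases h1 : (y + 1) % 3 = 0 <;> simp [h1]
          rw [hin2, outer_closed (998 - y).toNat (y + 1 + 1) _ (by omega)]
          rw [if_pos hy1]
          simp only [PySem.Int.floordiv_eq_ediv_of_pos (by norm_num : (0:Int) < 3)]
          have h1 : y + 1 + 1 - 1 = y + 1 := by ring
          rw [h1]
          by_cases h2 : (y + 1) % 3 = 0 <;> simp [h2] <;> omega
        · have hy999 : y = 999 := by omega
          subst hy999
          rw [PySem.List.pyRange_one_eq_nil (by norm_num)]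
          simp only [PySem.Int.floordiv_eq_ediv_of_pos (by norm_num : (0:Int) < 3)]
          norm_num
  | [] => exact absurd hpre (by simp [Pre_solve])
  | [_] => exact absurd hpre (by simp [Pre_solve])
  | [_, _] => exact absurd hpre (by simp [Pre_solve])
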